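-- pv_equiv track=rewrite | github.com/FlorenciaCorrea/lexer | lexer.py | a_comparacion
-- ===== SOURCE A (Python) =====
-- def a_comparacion(word):
-- 	s = 0
-- 	for c in word :
-- 		if s == 0 and c == '=':
-- 			s = 1
-- 		else:
-- 			s = -1
-- 			break
-- 	return s == 1
-- ===== SOURCE B (Python) =====
-- def a_comparacion(word):
--     return word == '='
-- ===== Notes on version B (the rewrite author's own statement) =====
-- stated objective: simpler
-- what changed: Replaced the state-machine loop with a break over the characters by a single closed-form string-equality test against '='.
import Mathlib
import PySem

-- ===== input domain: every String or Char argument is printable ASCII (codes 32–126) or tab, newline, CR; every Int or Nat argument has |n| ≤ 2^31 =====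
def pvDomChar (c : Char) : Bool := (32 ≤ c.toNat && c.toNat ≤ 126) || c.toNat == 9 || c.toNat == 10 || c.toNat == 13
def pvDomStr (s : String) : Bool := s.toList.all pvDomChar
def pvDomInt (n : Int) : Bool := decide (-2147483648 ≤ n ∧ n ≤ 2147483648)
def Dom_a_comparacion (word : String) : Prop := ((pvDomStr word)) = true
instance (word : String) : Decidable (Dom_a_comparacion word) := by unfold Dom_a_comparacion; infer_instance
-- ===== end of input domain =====

-- B replaces A's state-machine loop (with break) by one closed-form equality test; objective: simpler.

-- ===== PORT A =====
-- loop over the characters with state s; the `break` makes the rest of the word unvisited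
def aCompLoop (s : Int) (cs : List Char) : Int :=
  match cs with
  | [] => s
  | c :: rest => if s == 0 && c == '=' then aCompLoop 1 rest else -1

def a_comparacion (word : String) : Bool :=
  aCompLoop 0 word.toList == 1

-- ===== PORT B =====
def a_comparacion_alt (word : String) : Bool := word == "="

-- ===== PRECONDITION & SPEC =====
def Spec_a_comparacion (word : String) (out : Bool) : Prop := out = a_comparacion_alt word
instance (word : String) (out : Bool) : Decidable (Spec_a_comparacion word out) := by unfold Spec_a_comparacion; infer_instance

-- ===== CLAIM (what is proved, stated in full; the proofs are below) =====
def Claim_equal_a_comparacion : Prop := ∀ (word : String), Dom_a_comparacion word → Spec_a_comparacion word (a_comparacion word)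

-- ===== LEMMAS AND PROOFS =====
theorem aCompLoop_one (cs : List Char) : aCompLoop 1 cs = if cs = [] then 1 else -1 := by
  cases cs <;> simp [aCompLoop]

theorem aCompLoop_zero (cs : List Char) : (aCompLoop 0 cs == 1) = (cs == ['=']) := by
  cases cs with
  | nil => simp [aCompLoop]
  | cons c rest =>
    by_cases hc : c = '='
    · subst hc
      simp only [aCompLoop, beq_self_eq_true, Bool.and_true, aCompLoop_one]
      by_cases hr : rest = [] <;> simp [hr]
    · simp [aCompLoop, hc]

theorem str_eq_toList (word : String) : (word == "=") = (word.toList == ['=']) := by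
  by_cases h : word = "="
  · subst h; rfl
  · have h2 : word.toList ≠ ['='] := fun hl => h (by
      have := congrArg String.ofList hl
      simpa using this)
    simp [h, h2]

-- ===== VERDICT (by name: the statement is the Claim_ definition above) =====
theorem a_comparacion_spec : Claim_equal_a_comparacion := by
  intro word _
  unfold Spec_a_comparacion a_comparacion a_comparacion_alt
  rw [aCompLoop_zero, str_eq_toList]
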